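-- pv_equiv track=rewrite | github.com/sugan0tech/Projects | programming/python/susa/susa3.py | pytha
-- ===== SOURCE A (Python) =====
-- def pytha(n: int) -> int :
--     A = []
--     res = []
--     for i in range(n + 1):
--         A.append(i)
--     size = len(A)
--     for i in range(0, size - 2):
--         for j in range(i + 1, size - 1):
--             for k in range(j + 1, size):
--                 if A[i]**3 + A[j]**2 == A[k]**2:
--                     res.append((A[i], A[j], A[k]))
--     A = 0
--     B = 0
--     for i in res:
--         A += i[0]
--         B += i[1]
--     return A + B
-- ===== SOURCE B (Python) =====
-- def pytha(n: int) -> int: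
--     # O(n^2): precompute squares once; for each (i, j) look the candidate k up.
--     squares = {k * k: k for k in range(n + 1)}
--     total = 0
--     for i in range(n - 1):
--         for j in range(i + 1, n):
--             k = squares.get(i ** 3 + j * j)
--             if k is not None and k > j:
--                 total += i + j
--     return total
-- ===== Notes on version B (the rewrite author's own statement) =====
-- stated objective: faster
-- what changed: Replaced the O(n^3) triple loop (and the intermediate triple list) with a precomputed square->root dictionary, so each (i,j) pair does one O(1) lookup for k instead of scanning all k.
import Mathlib
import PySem

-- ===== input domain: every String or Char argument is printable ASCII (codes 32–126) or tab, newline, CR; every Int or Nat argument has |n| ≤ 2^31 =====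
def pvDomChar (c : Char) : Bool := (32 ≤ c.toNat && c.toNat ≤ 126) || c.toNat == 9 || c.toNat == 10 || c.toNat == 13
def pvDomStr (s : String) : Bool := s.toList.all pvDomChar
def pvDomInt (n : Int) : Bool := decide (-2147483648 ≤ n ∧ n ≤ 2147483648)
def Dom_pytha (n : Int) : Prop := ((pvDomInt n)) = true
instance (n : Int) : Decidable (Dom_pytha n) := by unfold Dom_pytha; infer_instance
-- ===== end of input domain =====

-- B replaces A's O(n^3) triple loop (and its intermediate triple list) by a precomputed
-- square->root dictionary so each (i,j) pair does one lookup for k: asymptotically faster.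


-- ===== PORT A =====
def pytha (n : Int) : Int :=
  let A : List Int := (PySem.List.pyRange 0 (n + 1) 1).foldl (fun acc i => acc ++ [i]) []
  let size : Int := (A.length : Int)
  let res : List (Int × Int × Int) :=
    (PySem.List.pyRange 0 (size - 2) 1).foldl (fun res i =>
      (PySem.List.pyRange (i + 1) (size - 1) 1).foldl (fun res j =>
        (PySem.List.pyRange (j + 1) size 1).foldl (fun res k =>
          if (PySem.List.pyGetD A i 0) ^ 3 + (PySem.List.pyGetD A j 0) ^ 2
              = (PySem.List.pyGetD A k 0) ^ 2 then
            res ++ [(PySem.List.pyGetD A i 0, PySem.List.pyGetD A j 0, PySem.List.pyGetD A k 0)]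
          else res) res) res) []
  let ab : Int × Int := res.foldl (fun ab t => (ab.1 + t.1, ab.2 + t.2.1)) (0, 0)
  ab.1 + ab.2

-- ===== PORT B =====
def pytha_alt (n : Int) : Int :=
  let squares : PySem.Dict Int Int :=
    (PySem.List.pyRange 0 (n + 1) 1).foldl (fun d k => d.insert (k * k) k) PySem.Dict.empty
  (PySem.List.pyRange 0 (n - 1) 1).foldl (fun total i =>
    (PySem.List.pyRange (i + 1) n 1).foldl (fun total j =>
      match squares.get? (i ^ 3 + j * j) with
      | some k => if j < k then total + (i + j) else total
      | none => total) total) 0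

-- ===== PRECONDITION & SPEC =====
def Spec_pytha (n : Int) (out : Int) : Prop := out = pytha_alt n
instance (n : Int) (out : Int) : Decidable (Spec_pytha n out) := by unfold Spec_pytha; infer_instance

-- ===== CLAIM (what is proved, stated in full; the proofs are below) =====
def Claim_equal_pytha : Prop := ∀ (n : Int), Dom_pytha n → Spec_pytha n (pytha n)

-- ===== LEMMAS AND PROOFS =====

-- B's squares dictionary (proof-only abbreviation) and B's per-(i,j) contribution
def sqDict (n : Int) : PySem.Dict Int Int :=
  (PySem.List.pyRange 0 (n + 1) 1).foldl (fun d k => d.insert (k * k) k) PySem.Dict.empty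

def gB (n i j : Int) : Int :=
  match (sqDict n).get? (i ^ 3 + j * j) with
  | some k => if j < k then i + j else 0
  | none => 0

-- lookup in B's dictionary succeeds with value k iff k is the (unique) root 0 ≤ k ≤ n with k*k = s
theorem sqD_get_nat (m : Nat) (s k : Int) :
    (((PySem.List.pyRange 0 (m : Int) 1).foldl (fun d x => d.insert (x * x) x)
        (PySem.Dict.empty : PySem.Dict Int Int)).get? s = some k)
      ↔ (0 ≤ k ∧ k < (m : Int) ∧ k * k = s) := by
  induction m with
  | zero =>
    rw [show ((0 : Nat) : Int) = 0 by norm_num, PySem.List.pyRange_one_eq_nil le_rfl]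
    simp [PySem.Dict.get?_empty]
    omega
  | succ m ih =>
    rw [show ((m + 1 : Nat) : Int) = (m : Int) + 1 by push_cast; ring,
      PySem.List.pyRange_one_succ_right (by positivity)]
    rw [List.foldl_append, List.foldl_cons, List.foldl_nil, PySem.Dict.get?_insert]
    split_ifs with h
    · constructor
      · rintro hk
        have hkm : k = (m : Int) := by injection hk with h'; omega
        subst hkm
        refine ⟨by positivity, by omega, h.symm⟩
      · rintro ⟨h0, h1, h2⟩
        have : k = (m : Int) := by nlinarith
        simp [this]
    · rw [ih]
      constructor
      · rintro ⟨h0, h1, h2⟩; exact ⟨h0, by omega, h2⟩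
      · rintro ⟨h0, h1, h2⟩
        refine ⟨h0, ?_, h2⟩
        rcases lt_or_eq_of_le (by omega : k ≤ (m : Int)) with h' | h'
        · exact h'
        · exact absurd (by rw [← h', h2]) h

theorem sqD_get (b : Int) (s k : Int) :
    (((PySem.List.pyRange 0 b 1).foldl (fun d x => d.insert (x * x) x)
        (PySem.Dict.empty : PySem.Dict Int Int)).get? s = some k)
      ↔ (0 ≤ k ∧ k < b ∧ k * k = s) := by
  by_cases hb : b ≤ 0
  · rw [PySem.List.pyRange_one_eq_nil hb]
    simp [PySem.Dict.get?_empty]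
    omega
  · have hb2 : b = ((b.toNat : Nat) : Int) := by omega
    rw [hb2]
    exact sqD_get_nat b.toNat s k

-- A's list A is range(n+1); indexing it is the identity
theorem getD_range (b x : Int) (h0 : 0 ≤ x) (h1 : x < b) :
    PySem.List.pyGetD (PySem.List.pyRange 0 b 1) x 0 = x := by
  have h := PySem.List.pyGetD_map_pyRange_of_nonneg (fun y => y) b x 0 h0 h1
  simpa using h

-- A's final summation loop over the triple list
theorem pairfold (res : List (Int × Int × Int)) (a b : Int) :
    res.foldl (fun (ab : Int × Int) t => (ab.1 + t.1, ab.2 + t.2.1)) (a, b)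
      = (a + (res.map (·.1)).sum, b + (res.map (·.2.1)).sum) := by
  induction res generalizing a b with
  | nil => simp
  | cons t ts ih => simp [List.foldl_cons, ih, add_assoc]

theorem sum_map_flatMap {α β : Type} (l : List α) (g : α → List β) (f : β → Int) :
    ((l.flatMap g).map f).sum = (l.map (fun x => ((g x).map f).sum)).sum := by
  induction l with
  | nil => simp
  | cons x xs ih => simp [List.flatMap_cons, ih]

-- per-(i,j) agreement: A's inner k-scan contributes exactly B's dictionary-lookup term
theorem inner_eq (n i j : Int) (hi : 0 ≤ i) (hij : i < j) :
    (((PySem.List.pyRange (j + 1) (n + 1) 1).countP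
        (fun k => decide (i ^ 3 + j ^ 2 = k ^ 2)) : Int)) * (i + j)
      = gB n i j := by
  have hj : 1 ≤ j := by omega
  unfold gB sqDict
  cases h : (((PySem.List.pyRange 0 (n + 1) 1).foldl (fun d x => d.insert (x * x) x)
      (PySem.Dict.empty : PySem.Dict Int Int)).get? (i ^ 3 + j * j)) with
  | none =>
    have hc : (PySem.List.pyRange (j + 1) (n + 1) 1).countP
        (fun k => decide (i ^ 3 + j ^ 2 = k ^ 2)) = 0 := by
      rw [List.countP_eq_zero]
      intro x hx
      rw [PySem.List.mem_pyRange_one] at hx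
      simp only [decide_eq_true_eq]
      intro hx2
      have hs : (((PySem.List.pyRange 0 (n + 1) 1).foldl (fun d x => d.insert (x * x) x)
          (PySem.Dict.empty : PySem.Dict Int Int)).get? (i ^ 3 + j * j)) = some x := by
        rw [sqD_get]
        exact ⟨by omega, by omega, by nlinarith [hx2]⟩
      rw [h] at hs
      exact (by simp at hs)
    simp [hc]
  | some k =>
    rw [sqD_get] at h
    obtain ⟨hk0, hkn, hks⟩ := h
    by_cases hjk : j < k
    · have hcong : ∀ x ∈ PySem.List.pyRange (j + 1) (n + 1) 1,
          ((decide (i ^ 3 + j ^ 2 = x ^ 2)) = true ↔ (x == k) = true) := by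
        intro x hx
        rw [PySem.List.mem_pyRange_one] at hx
        have hiff : (i ^ 3 + j ^ 2 = x ^ 2) ↔ x = k := by
          constructor
          · intro hx2; nlinarith [hx2, hks]
          · rintro rfl; nlinarith [hks]
        simp [hiff, beq_iff_eq]
      rw [List.countP_congr hcong]
      have hmem : k ∈ PySem.List.pyRange (j + 1) (n + 1) 1 := by
        rw [PySem.List.mem_pyRange_one]; omega
      rw [show (PySem.List.pyRange (j + 1) (n + 1) 1).countP (· == k)
            = (PySem.List.pyRange (j + 1) (n + 1) 1).count k from rfl]
      rw [List.count_eq_one_of_mem (PySem.List.nodup_pyRange_one _ _) hmem]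
      simp [hjk]
    · have hc : (PySem.List.pyRange (j + 1) (n + 1) 1).countP
          (fun k => decide (i ^ 3 + j ^ 2 = k ^ 2)) = 0 := by
        rw [List.countP_eq_zero]
        intro x hx
        rw [PySem.List.mem_pyRange_one] at hx
        simp only [decide_eq_true_eq]
        intro hx2
        have : x = k := by nlinarith [hx2, hks]
        omega
      simp [hc, hjk]

-- B as a double sum of gB
theorem alt_as_sum (n : Int) :
    pytha_alt n
      = ((PySem.List.pyRange 0 (n - 1) 1).map (fun i =>
          ((PySem.List.pyRange (i + 1) n 1).map (fun j => gB n i j)).sum)).sum := by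
  show (PySem.List.pyRange 0 (n - 1) 1).foldl (fun total i =>
      (PySem.List.pyRange (i + 1) n 1).foldl (fun total j =>
        match (sqDict n).get? (i ^ 3 + j * j) with
        | some k => if j < k then total + (i + j) else total
        | none => total) total) 0 = _
  rw [PySem.List.foldl_congr_mem _ _
    (fun total i => total + ((PySem.List.pyRange (i + 1) n 1).map (fun j => gB n i j)).sum) _ ?_]
  · rw [PySem.List.foldl_add]; simp
  · intro acc i _
    rw [PySem.List.foldl_congr_mem _ _ (fun total j => total + gB n i j) _ ?_]
    · rw [PySem.List.foldl_add]
    · intro acc' j _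
      unfold gB
      cases hget : (sqDict n).get? (i ^ 3 + j * j) with
      | none => simp [hget]
      | some k => by_cases hjk : j < k <;> simp [hget, hjk]

-- A as the same double sum (over the inner-loop count)
theorem a_as_sum (n : Int) (hn : -1 ≤ n) :
    pytha n
      = ((PySem.List.pyRange 0 (n - 1) 1).map (fun i =>
          ((PySem.List.pyRange (i + 1) n 1).map (fun j =>
            (((PySem.List.pyRange (j + 1) (n + 1) 1).countP
              (fun k => decide (i ^ 3 + j ^ 2 = k ^ 2)) : Int)) * (i + j))).sum)).sum := by
  simp only [pytha]
  rw [PySem.List.foldl_append_singleton_eq_self]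
  simp only [List.nil_append]
  have hsize : (((PySem.List.pyRange 0 (n + 1) 1).length : Nat) : Int) = n + 1 := by
    rw [PySem.List.length_pyRange_one]; omega
  rw [hsize, show n + 1 - 2 = n - 1 by ring, show n + 1 - 1 = n by ring]
  rw [PySem.List.foldl_congr_mem _ _
    (fun res i => (PySem.List.pyRange (i + 1) n 1).foldl (fun res j =>
      (PySem.List.pyRange (j + 1) (n + 1) 1).foldl (fun res k =>
        if i ^ 3 + j ^ 2 = k ^ 2 then res ++ [(i, j, k)] else res) res) res) _ ?_]
  · simp only [PySem.List.foldl_append_ite, PySem.List.foldl_append_eq_flatMap]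
    simp only [List.nil_append]
    rw [pairfold]
    simp only [zero_add, sum_map_flatMap, List.map_map]
    rw [← PySem.List.sum_map_add_int]
    refine congrArg _ (List.map_congr_left ?_)
    intro i _
    rw [← PySem.List.sum_map_add_int]
    refine congrArg _ (List.map_congr_left ?_)
    intro j _
    simp only [Function.comp_def]
    rw [PySem.List.sum_map_const_int, PySem.List.sum_map_const_int,
      List.countP_eq_length_filter]
    ring
  · intro acc i hi
    rw [PySem.List.mem_pyRange_one] at hi
    rw [getD_range _ _ (by omega) (by omega)]
    refine PySem.List.foldl_congr_mem _ _ _ _ ?_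
    intro acc' j hj
    rw [PySem.List.mem_pyRange_one] at hj
    rw [getD_range _ _ (by omega) (by omega)]
    refine PySem.List.foldl_congr_mem _ _ _ _ ?_
    intro acc'' k hk
    rw [PySem.List.mem_pyRange_one] at hk
    rw [getD_range _ _ (by omega) (by omega)]

-- ===== VERDICT (by name: the statement is the Claim_ definition above) =====
theorem pytha_spec : Claim_equal_pytha := by
  intro n _
  unfold Spec_pytha
  by_cases hn : -1 ≤ n
  · rw [a_as_sum n hn, alt_as_sum n]
    refine congrArg _ (List.map_congr_left ?_)
    intro i hi
    rw [PySem.List.mem_pyRange_one] at hi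
    refine congrArg _ (List.map_congr_left ?_)
    intro j hj
    rw [PySem.List.mem_pyRange_one] at hj
    exact inner_eq n i j (by omega) (by omega)
  · have e1 : PySem.List.pyRange 0 (n + 1) 1 = [] := PySem.List.pyRange_one_eq_nil (by omega)
    have e2 : PySem.List.pyRange 0 (n - 1) 1 = [] := PySem.List.pyRange_one_eq_nil (by omega)
    simp [pytha, pytha_alt, e1, e2]
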